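-- pv_equiv track=rewrite | github.com/pushkarcodes110/betting-app-by-vasu | userbaseapp/views.py | find_sp_numbers_with_digit
-- ===== SOURCE A (Python) =====
-- ALL_COLUMN_DATA = [
--     [128, 137, 146, 236, 245, 290, 380, 470, 489, 560, 579, 678, 100, 119, 155, 227, 335, 344, 399, 588, 669, 777],
--     [129, 138, 147, 156, 237, 246, 345, 390, 480, 570, 589, 679, 110, 200, 228, 255, 336, 499, 660, 688, 778, 444],
--     [120, 139, 148, 157, 238, 247, 256, 346, 490, 580, 670, 689, 166, 229, 300, 337, 355, 445, 599, 779, 788, 111],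
--     [130, 149, 158, 167, 239, 248, 257, 347, 356, 590, 680, 789, 112, 220, 266, 338, 400, 446, 455, 699, 770, 888],
--     [140, 159, 168, 230, 249, 258, 267, 348, 357, 456, 690, 780, 113, 122, 177, 339, 366, 447, 500, 799, 889, 555],
--     [123, 150, 169, 178, 240, 259, 268, 349, 358, 367, 457, 790, 114, 277, 330, 448, 466, 556, 600, 880, 899, 222],
--     [124, 160, 179, 250, 269, 278, 340, 359, 368, 458, 467, 890, 115, 133, 188, 223, 377, 449, 557, 566, 700, 999],
--     [125, 134, 170, 189, 260, 279, 350, 369, 378, 459, 468, 567, 116, 224, 233, 288, 440, 477, 558, 800, 990, 666],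
--     [126, 135, 180, 234, 270, 289, 360, 379, 450, 469, 478, 568, 117, 144, 199, 225, 388, 559, 577, 667, 900, 333],
--     [127, 136, 145, 190, 235, 280, 370, 389, 460, 479, 569, 578, 118, 226, 244, 299, 334, 488, 550, 668, 677, '000']
-- ]
--
-- def find_sp_numbers_with_digit(digit):
--     """
--     Find all SP numbers (first 12 from each column) that contain the given digit.
--     Common Pana 36 - searches only in SP numbers.
--
--     Args:
--         digit: Single digit (0-9) as string or int
--
--     Returns:
--         List of SP numbers containing the digit, sorted
--     """
--     digit_str = str(digit)
--
--     # Validate input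
--     if not digit_str.isdigit() or len(digit_str) != 1:
--         return []
--
--     sp_numbers_with_digit = []
--
--     # Iterate through all columns in ALL_COLUMN_DATA
--     for column in ALL_COLUMN_DATA:
--         # Get first 12 numbers (SP numbers) from each column
--         sp_numbers = column[0:12]
--
--         # Check if the digit appears in any of these SP numbers
--         for num in sp_numbers:
--             num_str = str(num)
--             if digit_str in num_str:
--                 sp_numbers_with_digit.append(num_str)
--
--     # Return sorted unique numbers
--     return sorted(list(set(sp_numbers_with_digit)))
-- ===== SOURCE B (Python) =====
-- # The 120 SP numbers (first 12 of each column of ALL_COLUMN_DATA), as strings,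
-- # deduplicated and sorted once at module level; each call just filters them.
-- _SP_STRS = [
--     '120', '123', '124', '125', '126', '127', '128', '129', '130', '134',
--     '135', '136', '137', '138', '139', '140', '145', '146', '147', '148',
--     '149', '150', '156', '157', '158', '159', '160', '167', '168', '169',
--     '170', '178', '179', '180', '189', '190', '230', '234', '235', '236',
--     '237', '238', '239', '240', '245', '246', '247', '248', '249', '250',
--     '256', '257', '258', '259', '260', '267', '268', '269', '270', '278',
--     '279', '280', '289', '290', '340', '345', '346', '347', '348', '349',
--     '350', '356', '357', '358', '359', '360', '367', '368', '369', '370',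
--     '378', '379', '380', '389', '390', '450', '456', '457', '458', '459',
--     '460', '467', '468', '469', '470', '478', '479', '480', '489', '490',
--     '560', '567', '568', '569', '570', '578', '579', '580', '589', '590',
--     '670', '678', '679', '680', '689', '690', '780', '789', '790', '890',
-- ]
--
--
-- def find_sp_numbers_with_digit(digit):
--     digit_str = str(digit)
--     if not digit_str.isdigit() or len(digit_str) != 1:
--         return []
--     return [s for s in _SP_STRS if digit_str in s]
-- ===== Notes on version B (the rewrite author's own statement) =====
-- stated objective: simpler
-- what changed: A rescans all ten full columns, slices each, substring-tests, deduplicates with a set and sorts on every call; B keeps one module-level sorted list of the distinct SP-number strings and each call is a single substring filter over that list, with no slicing, set or sort.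
import Mathlib
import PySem

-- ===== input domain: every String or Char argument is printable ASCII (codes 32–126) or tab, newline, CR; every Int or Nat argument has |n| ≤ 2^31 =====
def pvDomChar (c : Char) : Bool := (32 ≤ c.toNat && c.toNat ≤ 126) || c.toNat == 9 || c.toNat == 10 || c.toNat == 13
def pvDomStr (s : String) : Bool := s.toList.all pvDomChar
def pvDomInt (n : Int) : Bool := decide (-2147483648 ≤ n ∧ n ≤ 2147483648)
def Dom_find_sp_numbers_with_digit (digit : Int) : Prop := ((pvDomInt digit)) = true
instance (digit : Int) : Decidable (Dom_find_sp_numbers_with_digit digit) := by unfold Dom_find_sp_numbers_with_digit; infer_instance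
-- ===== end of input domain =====

-- B replaces A's per-call column scan + set + sort by one module-level sorted list of the
-- distinct SP-number strings, filtered per call by substring (objective: simpler; no speed claim).

-- The module constant mixes ints and the string '000'; PyVal models that heterogeneity,
-- pyStr is Python's str() on such a value.
inductive PyVal where
  | i : Int → PyVal
  | s : String → PyVal
deriving DecidableEq, Repr

def pyStr : PyVal → String
  | .i n => PySem.Int.toStr n
  | .s t => t

def ALL_COLUMN_DATA : List (List PyVal) := [
  [.i 128, .i 137, .i 146, .i 236, .i 245, .i 290, .i 380, .i 470, .i 489, .i 560, .i 579, .i 678, .i 100, .i 119, .i 155, .i 227, .i 335, .i 344, .i 399, .i 588, .i 669, .i 777],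
  [.i 129, .i 138, .i 147, .i 156, .i 237, .i 246, .i 345, .i 390, .i 480, .i 570, .i 589, .i 679, .i 110, .i 200, .i 228, .i 255, .i 336, .i 499, .i 660, .i 688, .i 778, .i 444],
  [.i 120, .i 139, .i 148, .i 157, .i 238, .i 247, .i 256, .i 346, .i 490, .i 580, .i 670, .i 689, .i 166, .i 229, .i 300, .i 337, .i 355, .i 445, .i 599, .i 779, .i 788, .i 111],
  [.i 130, .i 149, .i 158, .i 167, .i 239, .i 248, .i 257, .i 347, .i 356, .i 590, .i 680, .i 789, .i 112, .i 220, .i 266, .i 338, .i 400, .i 446, .i 455, .i 699, .i 770, .i 888],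
  [.i 140, .i 159, .i 168, .i 230, .i 249, .i 258, .i 267, .i 348, .i 357, .i 456, .i 690, .i 780, .i 113, .i 122, .i 177, .i 339, .i 366, .i 447, .i 500, .i 799, .i 889, .i 555],
  [.i 123, .i 150, .i 169, .i 178, .i 240, .i 259, .i 268, .i 349, .i 358, .i 367, .i 457, .i 790, .i 114, .i 277, .i 330, .i 448, .i 466, .i 556, .i 600, .i 880, .i 899, .i 222],
  [.i 124, .i 160, .i 179, .i 250, .i 269, .i 278, .i 340, .i 359, .i 368, .i 458, .i 467, .i 890, .i 115, .i 133, .i 188, .i 223, .i 377, .i 449, .i 557, .i 566, .i 700, .i 999],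
  [.i 125, .i 134, .i 170, .i 189, .i 260, .i 279, .i 350, .i 369, .i 378, .i 459, .i 468, .i 567, .i 116, .i 224, .i 233, .i 288, .i 440, .i 477, .i 558, .i 800, .i 990, .i 666],
  [.i 126, .i 135, .i 180, .i 234, .i 270, .i 289, .i 360, .i 379, .i 450, .i 469, .i 478, .i 568, .i 117, .i 144, .i 199, .i 225, .i 388, .i 559, .i 577, .i 667, .i 900, .i 333],
  [.i 127, .i 136, .i 145, .i 190, .i 235, .i 280, .i 370, .i 389, .i 460, .i 479, .i 569, .i 578, .i 118, .i 226, .i 244, .i 299, .i 334, .i 488, .i 550, .i 668, .i 677, .s "000"]]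

-- ===== PORT A =====
def find_sp_numbers_with_digit (digit : Int) : List String :=
  let digit_str := PySem.Int.toStr digit
  if PySem.Str.strIsdigit digit_str = false ∨ PySem.Str.len digit_str ≠ 1 then []
  else
    let acc := ALL_COLUMN_DATA.foldl (fun acc column =>
      let sp_numbers := PySem.List.slice column (some 0) (some 12)
      sp_numbers.foldl (fun acc num =>
        let num_str := pyStr num
        if PySem.Str.isIn digit_str num_str then acc ++ [num_str] else acc) acc) []
    PySem.List.sorted (PySem.Set.ofList acc) (fun x => x.toList) false

-- ===== PORT B =====
-- Source B's module-level constant: the 120 distinct SP-number strings, sorted.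
def SP_STRS : List String := [
  "120", "123", "124", "125", "126", "127", "128", "129", "130", "134",
  "135", "136", "137", "138", "139", "140", "145", "146", "147", "148",
  "149", "150", "156", "157", "158", "159", "160", "167", "168", "169",
  "170", "178", "179", "180", "189", "190", "230", "234", "235", "236",
  "237", "238", "239", "240", "245", "246", "247", "248", "249", "250",
  "256", "257", "258", "259", "260", "267", "268", "269", "270", "278",
  "279", "280", "289", "290", "340", "345", "346", "347", "348", "349",
  "350", "356", "357", "358", "359", "360", "367", "368", "369", "370",
  "378", "379", "380", "389", "390", "450", "456", "457", "458", "459",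
  "460", "467", "468", "469", "470", "478", "479", "480", "489", "490",
  "560", "567", "568", "569", "570", "578", "579", "580", "589", "590",
  "670", "678", "679", "680", "689", "690", "780", "789", "790", "890"]

def find_sp_numbers_with_digit_alt (digit : Int) : List String :=
  let digit_str := PySem.Int.toStr digit
  if PySem.Str.strIsdigit digit_str = false ∨ PySem.Str.len digit_str ≠ 1 then []
  else SP_STRS.filter (fun s => PySem.Str.isIn digit_str s)

-- ===== PRECONDITION & SPEC =====
def Spec_find_sp_numbers_with_digit (digit : Int) (out : List String) : Prop := out = find_sp_numbers_with_digit_alt digit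
instance (digit : Int) (out : List String) : Decidable (Spec_find_sp_numbers_with_digit digit out) := by unfold Spec_find_sp_numbers_with_digit; infer_instance

-- ===== CLAIM (what is proved, stated in full; the proofs are below) =====
def Claim_equal_find_sp_numbers_with_digit : Prop := ∀ (digit : Int), Dom_find_sp_numbers_with_digit digit → Spec_find_sp_numbers_with_digit digit (find_sp_numbers_with_digit digit)

-- ===== LEMMAS AND PROOFS =====

lemma pv_digit_char_cases (c : Char) (h1 : 48 ≤ c.toNat) (h2 : c.toNat ≤ 57) :
    c ∈ ['0','1','2','3','4','5','6','7','8','9'] := by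
  have h : c.toNat = 48 ∨ c.toNat = 49 ∨ c.toNat = 50 ∨ c.toNat = 51 ∨ c.toNat = 52 ∨
      c.toNat = 53 ∨ c.toNat = 54 ∨ c.toNat = 55 ∨ c.toNat = 56 ∨ c.toNat = 57 := by omega
  rw [← Char.ofNat_toNat c]
  rcases h with h|h|h|h|h|h|h|h|h|h <;> rw [h] <;> decide

-- the two ports agree for every value of digit_str = str(digit)
set_option maxRecDepth 4000000 in
lemma pv_core (s : String) :
    (if PySem.Str.strIsdigit s = false ∨ PySem.Str.len s ≠ 1 then ([] : List String)
     else
       PySem.List.sorted (PySem.Set.ofList (ALL_COLUMN_DATA.foldl (fun acc column =>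
         (PySem.List.slice column (some 0) (some 12)).foldl (fun acc num =>
           if PySem.Str.isIn s (pyStr num) then acc ++ [pyStr num] else acc) acc) []))
         (fun x => x.toList) false)
    = (if PySem.Str.strIsdigit s = false ∨ PySem.Str.len s ≠ 1 then []
       else SP_STRS.filter (fun t => PySem.Str.isIn s t)) := by
  by_cases hg : PySem.Str.strIsdigit s = false ∨ PySem.Str.len s ≠ 1
  · rw [if_pos hg, if_pos hg]
  · rw [if_neg hg, if_neg hg]
    push Not at hg
    obtain ⟨h1, h2⟩ := hg
    rw [PySem.Str.len_eq] at h2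
    have hlen : s.toList.length = 1 := by omega
    obtain ⟨c, hc⟩ := List.length_eq_one_iff.mp hlen
    rw [PySem.Str.strIsdigit_eq, hc] at h1
    simp [PySem.Chars.strIsdigit, PySem.Chars.isdigit] at h1
    have hs10 := pv_digit_char_cases c h1.1 h1.2
    rw [← String.ofList_toList (s := s)]
    fin_cases hs10
    · rw [hc]; decide
    · rw [hc]; decide
    · rw [hc]; decide
    · rw [hc]; decide
    · rw [hc]; decide
    · rw [hc]; decide
    · rw [hc]; decide
    · rw [hc]; decide
    · rw [hc]; decide
    · rw [hc]; decide

-- ===== VERDICT (by name: the statement is the Claim_ definition above) =====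
theorem find_sp_numbers_with_digit_spec : Claim_equal_find_sp_numbers_with_digit := by
  intro digit _
  unfold Spec_find_sp_numbers_with_digit find_sp_numbers_with_digit find_sp_numbers_with_digit_alt
  exact pv_core (PySem.Int.toStr digit)
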